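-- pv_equiv track=rewrite | github.com/Telepact/telepact | lib/py/telepact/internal/GetApiDefinitionsWithExamples.py | _get_default_fn_scope
-- ===== SOURCE A (Python) =====
-- def _get_default_fn_scope(parsed_types: dict[str, 'TType']) -> str:
--     non_internal_functions = sorted([
--         schema_key for schema_key in parsed_types.keys()
--         if schema_key.startswith('fn.') and not schema_key.endswith('.->') and not schema_key.endswith('_')
--     ])
--     if non_internal_functions:
--         return non_internal_functions[0]
--
--     all_functions = sorted([
--         schema_key for schema_key in parsed_types.keys()
--         if schema_key.startswith('fn.') and not schema_key.endswith('.->')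
--     ])
--     if all_functions:
--         return all_functions[0]
--
--     return 'fn.ping_'
-- ===== SOURCE B (Python) =====
-- def _get_default_fn_scope(parsed_types: dict[str, 'TType']) -> str:
--     best_strict = None
--     best_weak = None
--     for key in parsed_types.keys():
--         if not key.startswith('fn.') or key.endswith('.->'):
--             continue
--         if best_weak is None or key < best_weak:
--             best_weak = key
--         if not key.endswith('_') and (best_strict is None or key < best_strict):
--             best_strict = key
--     if best_strict is not None:
--         return best_strict
--     if best_weak is not None:
--         return best_weak
--     return 'fn.ping_'
-- ===== Notes on version B (the rewrite author's own statement) =====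
-- stated objective: alternative
-- what changed: Replaces the two filter+sort passes (each O(n log n) with list materialisation) by a single loop over the keys maintaining two running minima (best_strict, best_weak), returning best_strict, else best_weak, else 'fn.ping_'.
import Mathlib
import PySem

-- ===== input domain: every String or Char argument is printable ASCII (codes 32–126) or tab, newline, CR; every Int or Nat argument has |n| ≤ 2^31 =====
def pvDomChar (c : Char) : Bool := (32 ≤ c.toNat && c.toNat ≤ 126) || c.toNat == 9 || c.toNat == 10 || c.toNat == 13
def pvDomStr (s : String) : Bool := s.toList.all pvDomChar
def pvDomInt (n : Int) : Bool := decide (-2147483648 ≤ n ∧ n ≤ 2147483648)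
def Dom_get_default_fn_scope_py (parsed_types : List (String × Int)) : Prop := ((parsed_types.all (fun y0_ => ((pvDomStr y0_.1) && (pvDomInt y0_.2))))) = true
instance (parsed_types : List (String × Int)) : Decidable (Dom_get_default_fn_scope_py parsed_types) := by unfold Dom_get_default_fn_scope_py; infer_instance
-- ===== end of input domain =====

-- B replaces A's two filter+sort passes by a single loop over the keys keeping two running minima; alternative decomposition, same results.


-- ===== PORT A =====
def get_default_fn_scope_py (parsed_types : List (String × Int)) : String :=
  let keys := (PySem.Dict.ofList parsed_types).keys
  let non_internal_functions :=
    PySem.List.sorted (keys.filter (fun k =>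
      PySem.Str.startswith k "fn." && !PySem.Str.endswith k ".->" && !PySem.Str.endswith k "_"))
      (fun x => x) false
  match non_internal_functions with
  | k :: _ => k
  | [] =>
    let all_functions :=
      PySem.List.sorted (keys.filter (fun k =>
        PySem.Str.startswith k "fn." && !PySem.Str.endswith k ".->"))
        (fun x => x) false
    match all_functions with
    | k :: _ => k
    | [] => "fn.ping_"

-- ===== PORT B =====
-- "best is None or key < best: best = key"
def gdfUpd (best : Option String) (k : String) : Option String :=
  match best with
  | none => some k
  | some b => if k < b then some k else some b

def get_default_fn_scope_py_alt (parsed_types : List (String × Int)) : String :=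
  let st := (PySem.Dict.ofList parsed_types).keys.foldl
    (fun (acc : Option String × Option String) k =>
      if !(PySem.Str.startswith k "fn.") || PySem.Str.endswith k ".->" then acc
      else
        (if !(PySem.Str.endswith k "_") then gdfUpd acc.1 k else acc.1, gdfUpd acc.2 k))
    (none, none)
  match st.1 with
  | some s => s
  | none =>
    match st.2 with
    | some w => w
    | none => "fn.ping_"

-- ===== PRECONDITION & SPEC =====
def Spec_get_default_fn_scope_py (parsed_types : List (String × Int)) (out : String) : Prop := out = get_default_fn_scope_py_alt parsed_types
instance (parsed_types : List (String × Int)) (out : String) : Decidable (Spec_get_default_fn_scope_py parsed_types out) := by unfold Spec_get_default_fn_scope_py; infer_instance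

-- ===== CLAIM (what is proved, stated in full; the proofs are below) =====
def Claim_equal_get_default_fn_scope_py : Prop := ∀ (parsed_types : List (String × Int)), Dom_get_default_fn_scope_py parsed_types → Spec_get_default_fn_scope_py parsed_types (get_default_fn_scope_py parsed_types)

-- ===== LEMMAS AND PROOFS =====

theorem gdfUpd_foldl_some (l : List String) (b : String) :
    l.foldl gdfUpd (some b) = some (l.foldl min b) := by
  induction l generalizing b with
  | nil => rfl
  | cons x t ih =>
    have hmin : gdfUpd (some b) x = some (min b x) := by
      by_cases h : x < b
      · simp [gdfUpd, h, min_eq_right h.le]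
      · simp [gdfUpd, h, min_eq_left (not_lt.1 h)]
    simp only [List.foldl_cons, hmin, ih]

theorem gdfUpd_foldl_none (l : List String) :
    l.foldl gdfUpd none = PySem.List.min? l (fun y => y) := by
  cases l with
  | nil => rfl
  | cons x t =>
    rw [PySem.List.min?_id_cons]
    simpa [gdfUpd] using gdfUpd_foldl_some t x

theorem min?_eq_head_sorted (l : List String) (m : String) (t : List String)
    (h : PySem.List.sorted l (fun x => x) false = m :: t) :
    PySem.List.min? l (fun y => y) = some m := by
  have hmem : m ∈ l := by
    have hmem' : m ∈ PySem.List.sorted l (fun x => x) false := by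
      rw [h]; exact List.mem_cons_self ..
    exact (PySem.List.mem_sorted l (fun x => x) false m).1 hmem'
  have hne : l ≠ [] := by rintro rfl; simp [PySem.List.sorted] at h
  obtain ⟨m', hm'⟩ : ∃ m', PySem.List.min? l (fun y => y) = some m' := by
    cases hq : PySem.List.min? l (fun y => y) with
    | none => exact absurd ((PySem.List.min?_eq_none_iff l (fun y => y)).1 hq) hne
    | some m' => exact ⟨m', rfl⟩
  have h1 : m' ≤ m := PySem.List.min?_isMin hm' m hmem
  have h2 : m ≤ m' := PySem.List.key_head_sorted_le l (fun x => x) h m' (PySem.List.min?_mem hm')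
  rw [hm', le_antisymm h1 h2]

-- B's single fold splits into two independent minimum folds over A's two filtered lists
theorem fold_split (p q r : String → Bool) (l : List String) (a b : Option String) :
    l.foldl
      (fun (acc : Option String × Option String) k =>
        if !(p k) || q k then acc
        else (if !(r k) then gdfUpd acc.1 k else acc.1, gdfUpd acc.2 k))
      (a, b)
    = ((l.filter (fun k => p k && !(q k) && !(r k))).foldl gdfUpd a,
       (l.filter (fun k => p k && !(q k))).foldl gdfUpd b) := by
  induction l generalizing a b with
  | nil => rfl
  | cons x t ih =>
    cases hp : p x <;> cases hq : q x <;> cases hr : r x <;>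
      simp only [List.foldl_cons, List.filter_cons, hp, hq, hr, Bool.not_false, Bool.not_true,
        Bool.or_true, Bool.or_false, Bool.and_true, if_true] <;>
      exact ih _ _

-- head-of-sorted-filter vs fold-of-running-minimum, for both of A's filters at once
theorem ports_eq (keys : List String) :
    (match PySem.List.sorted (keys.filter (fun k =>
        PySem.Str.startswith k "fn." && !PySem.Str.endswith k ".->" && !PySem.Str.endswith k "_"))
        (fun x => x) false with
     | k :: _ => k
     | [] =>
       match PySem.List.sorted (keys.filter (fun k =>
           PySem.Str.startswith k "fn." && !PySem.Str.endswith k ".->")) (fun x => x) false with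
       | k :: _ => k
       | [] => "fn.ping_")
    = (match (keys.filter (fun k =>
          PySem.Str.startswith k "fn." && !PySem.Str.endswith k ".->" && !PySem.Str.endswith k "_")).foldl gdfUpd none with
       | some s => s
       | none =>
         match (keys.filter (fun k =>
             PySem.Str.startswith k "fn." && !PySem.Str.endswith k ".->")).foldl gdfUpd none with
         | some w => w
         | none => "fn.ping_") := by
  cases hS : PySem.List.sorted (keys.filter (fun k =>
      PySem.Str.startswith k "fn." && !PySem.Str.endswith k ".->" && !PySem.Str.endswith k "_"))
      (fun x => x) false with
  | cons m t => rw [gdfUpd_foldl_none, min?_eq_head_sorted _ m t hS]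
  | nil =>
    have hf := (PySem.List.sorted_eq_nil_iff _ _ _).1 hS
    cases hS2 : PySem.List.sorted (keys.filter (fun k =>
        PySem.Str.startswith k "fn." && !PySem.Str.endswith k ".->")) (fun x => x) false with
    | cons m t =>
      rw [hf, gdfUpd_foldl_none (keys.filter (fun k =>
            PySem.Str.startswith k "fn." && !PySem.Str.endswith k ".->")),
          min?_eq_head_sorted _ m t hS2]
      rfl
    | nil =>
      rw [hf, (PySem.List.sorted_eq_nil_iff _ _ _).1 hS2]
      rfl

-- ===== VERDICT (by name: the statement is the Claim_ definition above) =====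
theorem get_default_fn_scope_py_spec : Claim_equal_get_default_fn_scope_py := by
  intro parsed_types _
  unfold Spec_get_default_fn_scope_py get_default_fn_scope_py get_default_fn_scope_py_alt
  rw [fold_split]
  exact ports_eq (PySem.Dict.ofList parsed_types).keys
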